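-- pv_equiv track=rewrite | github.com/ryt369/cs61a | projects/hog/hog.py | sus_points
-- ===== SOURCE A (Python) =====
-- def is_prime(n):
--     """Return whether N is prime."""
--     if n == 1:
--         return False
--     k = 2
--     while k < n:
--         if n % k == 0:
--             return False
--         k += 1
--     return True
--
-- def num_factors(n):
--     """Return the number of factors of N, including 1 and N itself."""
--     # BEGIN PROBLEM 4
--     "*** YOUR CODE HERE ***"
--     factors_num = 0
--     for i in range(1, n + 1):
--         if n % i == 0:
--             factors_num += 1
--     return factors_num
--
-- def sus_points(score):
--     """Return the new score of a player taking into account the Sus Fuss rule."""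
--     # BEGIN PROBLEM 4
--     "*** YOUR CODE HERE ***"
--     num = num_factors(score)
--     if num == 3 or num == 4:
--         new_score = score
--         while not is_prime(new_score):
--             new_score += 1
--         return new_score
--     return score
-- ===== SOURCE B (Python) =====
-- def is_prime(n):
--     """Return whether N is prime, trial-dividing only up to sqrt(n)."""
--     if n < 2:
--         return False
--     k = 2
--     while k * k <= n:
--         if n % k == 0:
--             return False
--         k += 1
--     return True
--
--
-- def num_factors(n):
--     """Count the divisors of N by scanning i up to sqrt(n), counting pairs (i, n//i)."""
--     if n <= 0:
--         return 0
--     count = 0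
--     i = 1
--     while i * i <= n:
--         if n % i == 0:
--             count += 1 if i == n // i else 2
--         i += 1
--     return count
--
--
-- def sus_points(score):
--     """Return the new score of a player taking into account the Sus Fuss rule."""
--     if num_factors(score) in (3, 4):
--         new_score = score
--         while not is_prime(new_score):
--             new_score += 1
--         return new_score
--     return score
-- ===== Notes on version B (the rewrite author's own statement) =====
-- stated objective: faster
-- what changed: num_factors now counts divisors in pairs (i, n//i) scanning only i*i <= n, and is_prime trial-divides only up to sqrt(n), replacing A's linear scans over 1..n and 2..n-1.
import Mathlib
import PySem

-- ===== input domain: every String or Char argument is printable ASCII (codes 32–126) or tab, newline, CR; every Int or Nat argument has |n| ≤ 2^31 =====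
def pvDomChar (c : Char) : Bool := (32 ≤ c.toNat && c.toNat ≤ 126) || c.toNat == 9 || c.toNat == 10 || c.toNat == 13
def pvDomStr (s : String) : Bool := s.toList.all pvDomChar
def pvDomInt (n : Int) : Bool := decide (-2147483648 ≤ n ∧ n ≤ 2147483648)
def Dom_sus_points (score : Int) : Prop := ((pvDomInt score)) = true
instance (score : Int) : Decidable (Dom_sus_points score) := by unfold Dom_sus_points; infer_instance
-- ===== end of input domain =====

-- B replaces A's linear scans by square-root-bounded ones: num_factors counts divisors in
-- pairs (i, n//i) while i*i <= n, and is_prime trial-divides only while k*k <= n (objective: faster).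

-- ===== PORT A =====
-- 'k = 2; while k < n: if n % k == 0: return False; k += 1; return True' — an early-exit scan of range(2, n)
def is_primeA (n : Int) : Bool :=
  if n = 1 then false
  else (PySem.List.pyRange 2 n 1).all (fun k => !(decide (PySem.Int.mod n k = 0)))

def num_factorsA (n : Int) : Int :=
  (PySem.List.pyRange 1 (n + 1) 1).foldl
    (fun acc i => if PySem.Int.mod n i = 0 then acc + 1 else acc) 0

-- 'while not is_prime(new_score): new_score += 1' — fueled; fuel score.toNat + 1 suffices on the
-- reachable inputs (the branch below is only taken for score ≥ 4, and [score, 2*score] holds a prime)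
def sp_loopA : Nat → Int → Int
  | 0, s => s
  | fuel + 1, s => if is_primeA s then s else sp_loopA fuel (s + 1)

def sus_points (score : Int) : Int :=
  let num := num_factorsA score
  if num = 3 ∨ num = 4 then sp_loopA (score.toNat + 1) score
  else score

-- ===== PORT B =====
-- termination helper for the while-loops below (i*i ≤ n forces i ≤ n)
theorem pv_sq_le_imp_le (i n : Int) (h : i * i ≤ n) : i ≤ n := by nlinarith [sq_nonneg i]

-- 'while k * k <= n: if n % k == 0: return False; k += 1'
def ip_loopB (n k : Int) : Bool :=
  if h : k * k ≤ n then
    (if PySem.Int.mod n k = 0 then false else ip_loopB n (k + 1))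
  else true
termination_by (n + 1 - k).toNat
decreasing_by have := pv_sq_le_imp_le k n h; omega

def is_primeB (n : Int) : Bool :=
  if n < 2 then false else ip_loopB n 2

-- 'while i * i <= n: if n % i == 0: count += 1 if i == n // i else 2; i += 1'
def nf_loopB (n i count : Int) : Int :=
  if h : i * i ≤ n then
    nf_loopB n (i + 1)
      (if PySem.Int.mod n i = 0 then
        (if i = PySem.Int.floordiv n i then count + 1 else count + 2)
       else count)
  else count
termination_by (n + 1 - i).toNat
decreasing_by have := pv_sq_le_imp_le i n h; omega

def num_factorsB (n : Int) : Int :=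
  if n ≤ 0 then 0 else nf_loopB n 1 0

def sp_loopB : Nat → Int → Int
  | 0, s => s
  | fuel + 1, s => if is_primeB s then s else sp_loopB fuel (s + 1)

def sus_points_alt (score : Int) : Int :=
  if num_factorsB score = 3 ∨ num_factorsB score = 4 then sp_loopB (score.toNat + 1) score
  else score

-- ===== PRECONDITION & SPEC =====
def Spec_sus_points (score : Int) (out : Int) : Prop := out = sus_points_alt score
instance (score : Int) (out : Int) : Decidable (Spec_sus_points score out) := by unfold Spec_sus_points; infer_instance

-- ===== CLAIM (what is proved, stated in full; the proofs are below) =====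
def Claim_equal_sus_points : Prop := ∀ (score : Int), Dom_sus_points score → Spec_sus_points score (sus_points score)

-- ===== LEMMAS AND PROOFS =====

-- the per-divisor weight B adds for a small divisor i
def gB (n : Int) : Int → Int := fun i =>
  if PySem.Int.mod n i = 0 then (if i = PySem.Int.floordiv n i then 1 else 2) else 0

-- Nat-indexed indicator / weight functions (m = n.toNat)
def FA (m : Nat) : Nat → Int := fun i => if i ∣ m then 1 else 0
def FB (m : Nat) : Nat → Int := fun i => if i ∣ m then (if i = m / i then 1 else 2) else 0
def NA (m : Nat) : Nat → Nat := fun i => if i ∣ m then 1 else 0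
def NB (m : Nat) : Nat → Nat := fun i => if i ∣ m then (if i = m / i then 1 else 2) else 0

-- list-range sums as Finset.range sums (Int-valued)
theorem pv_list_range_sum (f : Nat → Int) (m : Nat) :
    ((List.range m).map f).sum = ∑ k ∈ Finset.range m, f k := by
  induction m with
  | zero => simp
  | succ m ih => simp [List.range_succ, Finset.sum_range_succ, ih]

theorem pv_list_range_countP (q : Nat → Bool) (m : Nat) :
    (((List.range m).countP q : Nat) : Int) = ∑ k ∈ Finset.range m, (if q k then (1 : Int) else 0) := by
  induction m with
  | zero => simp
  | succ m ih =>
    rw [List.range_succ, List.countP_append, Finset.sum_range_succ, ← ih]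
    by_cases h : q m = true
    · simp [List.countP_cons, h]
    · simp [List.countP_cons, h]

-- shift a Finset.range sum to an Icc sum
theorem pv_shift (f : Nat → Nat) (n : Nat) :
    ∑ k ∈ Finset.range n, f (1 + k) = ∑ i ∈ Finset.Icc 1 n, f i := by
  induction n with
  | zero => simp
  | succ n ih =>
    rw [Finset.sum_range_succ, ih, Finset.sum_Icc_succ_top (by omega)]
    rw [Nat.add_comm 1 n]

-- ===== the core divisor-pairing identity (Nat, over Icc) =====
theorem pv_pairing (m : Nat) (hm : 1 ≤ m) :
    ((Finset.Icc 1 m).filter (· ∣ m)).card = ∑ i ∈ Finset.Icc 1 (Nat.sqrt m), NB m i := by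
  have hSD : (Finset.Icc 1 (Nat.sqrt m)).filter (· ∣ m)
      = ((Finset.Icc 1 m).filter (· ∣ m)).filter (fun d => d * d ≤ m) := by
    ext i
    rw [Finset.mem_filter, Finset.mem_filter, Finset.mem_filter, Finset.mem_Icc, Finset.mem_Icc]
    constructor
    · rintro ⟨⟨h1, h2⟩, hdvd⟩
      exact ⟨⟨⟨h1, Nat.le_of_dvd hm hdvd⟩, hdvd⟩, Nat.le_sqrt.mp h2⟩
    · rintro ⟨⟨⟨h1, _⟩, hdvd⟩, hsq⟩
      exact ⟨⟨h1, Nat.le_sqrt.mpr hsq⟩, hdvd⟩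
  have hRHS : ∑ i ∈ Finset.Icc 1 (Nat.sqrt m), NB m i
      = ∑ i ∈ (Finset.Icc 1 (Nat.sqrt m)).filter (· ∣ m), (if i = m / i then 1 else 2) := by
    rw [Finset.sum_filter]
    exact Finset.sum_congr rfl (fun i _ => rfl)
  have hRHS2 : ∑ i ∈ (Finset.Icc 1 (Nat.sqrt m)).filter (· ∣ m), (if i = m / i then (1:Nat) else 2)
      = ((Finset.Icc 1 (Nat.sqrt m)).filter (· ∣ m)).card
        + (((Finset.Icc 1 (Nat.sqrt m)).filter (· ∣ m)).filter (fun i => ¬ i = m / i)).card := by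
    calc ∑ i ∈ (Finset.Icc 1 (Nat.sqrt m)).filter (· ∣ m), (if i = m / i then (1:Nat) else 2)
        = ∑ i ∈ (Finset.Icc 1 (Nat.sqrt m)).filter (· ∣ m), (1 + (if i = m / i then 0 else 1)) := by
          exact Finset.sum_congr rfl (fun i _ => by split <;> rfl)
      _ = _ := by
          rw [Finset.sum_add_distrib, Finset.sum_const, smul_eq_mul, mul_one]
          congr 1
          rw [Finset.card_filter]
          refine Finset.sum_congr rfl (fun i _ => ?_)
          by_cases h : i = m / i
          · rw [if_neg (not_not_intro h), if_pos h]
          · rw [if_pos h, if_neg h]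
  have hsplit : (((Finset.Icc 1 m).filter (· ∣ m)).filter (fun d => d * d ≤ m)).card
      + (((Finset.Icc 1 m).filter (· ∣ m)).filter (fun d => ¬ d * d ≤ m)).card
      = ((Finset.Icc 1 m).filter (· ∣ m)).card :=
    Finset.card_filter_add_card_filter_not (fun d => d * d ≤ m)
  have hbij : (((Finset.Icc 1 m).filter (· ∣ m)).filter (fun d => ¬ d * d ≤ m)).card
      = (((Finset.Icc 1 (Nat.sqrt m)).filter (· ∣ m)).filter (fun i => ¬ i = m / i)).card := by
    apply Finset.card_nbij' (i := fun d => m / d) (j := fun d => m / d)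
    · intro d hd
      rw [Finset.mem_coe, Finset.mem_filter, Finset.mem_filter, Finset.mem_Icc] at hd
      obtain ⟨⟨⟨hd1, _⟩, hdvd⟩, hlarge⟩ := hd
      obtain ⟨c, hc⟩ := hdvd
      have hcd : m / d = c := by rw [hc]; exact Nat.mul_div_cancel_left c hd1
      have hc1 : 1 ≤ c := by
        rcases Nat.eq_zero_or_pos c with h | h
        · subst h; simp at hc; omega
        · exact h
      have hcltd : c < d := by nlinarith
      have hsq : c * c ≤ m := by nlinarith
      have hmc : m / c = d := by rw [hc, Nat.mul_comm]; exact Nat.mul_div_cancel_left d hc1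
      show m / d ∈ ((Finset.Icc 1 (Nat.sqrt m)).filter (· ∣ m)).filter (fun i => ¬ i = m / i)
      rw [Finset.mem_filter, Finset.mem_filter, Finset.mem_Icc, hcd]
      exact ⟨⟨⟨hc1, Nat.le_sqrt.mpr hsq⟩, ⟨d, by rw [hc]; ring⟩⟩, by rw [hmc]; omega⟩
    · intro i hi
      rw [Finset.mem_coe, Finset.mem_filter, Finset.mem_filter, Finset.mem_Icc] at hi
      obtain ⟨⟨⟨hi1, hisqrt⟩, hdvd⟩, hne⟩ := hi
      obtain ⟨c, hc⟩ := hdvd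
      have hic : m / i = c := by rw [hc]; exact Nat.mul_div_cancel_left c hi1
      have hsq : i * i ≤ m := Nat.le_sqrt.mp hisqrt
      have hc1 : 1 ≤ c := by
        rcases Nat.eq_zero_or_pos c with h | h
        · subst h; simp at hc; omega
        · exact h
      have hiltc : i < c := by
        rcases Nat.lt_or_ge i c with h | h
        · exact h
        · exfalso; apply hne; rw [hic]; nlinarith
      show m / i ∈ ((Finset.Icc 1 m).filter (· ∣ m)).filter (fun d => ¬ d * d ≤ m)
      rw [Finset.mem_filter, Finset.mem_filter, Finset.mem_Icc, hic]
      refine ⟨⟨⟨hc1, ?_⟩, ⟨i, by rw [hc]; ring⟩⟩, by nlinarith⟩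
      calc c ≤ i * c := Nat.le_mul_of_pos_left c hi1
        _ = m := hc.symm
    · intro d hd
      rw [Finset.mem_coe, Finset.mem_filter, Finset.mem_filter, Finset.mem_Icc] at hd
      show m / (m / d) = d
      exact Nat.div_div_self hd.1.2 (by omega)
    · intro i hi
      rw [Finset.mem_coe, Finset.mem_filter, Finset.mem_filter, Finset.mem_Icc] at hi
      show m / (m / i) = i
      exact Nat.div_div_self hi.1.2 (by omega)
  rw [hRHS, hRHS2, ← hsplit, hbij, hSD]

-- characterize B's primality loop (valid from any start k ≥ 1)
theorem ip_loopB_iff (n : Int) : ∀ (fuel : Nat) (k : Int), (n + 1 - k).toNat ≤ fuel → 1 ≤ k →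
    (ip_loopB n k = true ↔ ∀ j : Int, k ≤ j → j * j ≤ n → ¬ PySem.Int.mod n j = 0) := by
  intro fuel
  induction fuel with
  | zero =>
    intro k hf hk
    have hkn : n < k := by omega
    have hguard : ¬ k * k ≤ n := by nlinarith
    rw [ip_loopB]
    simp only [hguard, dite_false]
    constructor
    · intro _ j hj hjj
      exfalso; nlinarith
    · intro _; trivial
  | succ fuel ih =>
    intro k hf hk
    by_cases hguard : k * k ≤ n
    · have hkn : k ≤ n := pv_sq_le_imp_le k n hguard
      rw [ip_loopB]
      simp only [hguard, dite_true]
      by_cases hmod : PySem.Int.mod n k = 0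
      · simp only [hmod, if_true]
        constructor
        · intro h; exact absurd h (by simp)
        · intro h; exact absurd hmod (h k le_rfl hguard)
      · simp only [hmod, if_false]
        rw [ih (k + 1) (by omega) (by omega)]
        constructor
        · intro h j hj hjj
          rcases eq_or_lt_of_le hj with rfl | hlt
          · exact hmod
          · exact h j (by omega) hjj
        · intro h j hj hjj; exact h j (by omega) hjj
    · rw [ip_loopB]
      simp only [hguard, dite_false]
      constructor
      · intro _ j hj hjj
        exfalso; apply hguard; nlinarith
      · intro _; trivial

-- characterize B's factor-counting loop: it adds the pair-weights over [i, sqrt n]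
theorem nf_loopB_spec (n : Int) (hn : 1 ≤ n) : ∀ (fuel : Nat) (i c : Int), (n + 1 - i).toNat ≤ fuel → 1 ≤ i →
    nf_loopB n i c = c + ((PySem.List.pyRange i ((Nat.sqrt n.toNat : Int) + 1) 1).map (gB n)).sum := by
  intro fuel
  induction fuel with
  | zero =>
    intro i c hf hi
    have hin : n < i := by omega
    have hguard : ¬ i * i ≤ n := by nlinarith
    rw [nf_loopB]
    simp only [hguard, dite_false]
    have hr : ((Nat.sqrt n.toNat : Int) + 1) ≤ i := by
      have h1 : Nat.sqrt n.toNat ≤ n.toNat := Nat.sqrt_le_self _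
      omega
    rw [PySem.List.pyRange_one_eq_nil hr]
    simp
  | succ fuel ih =>
    intro i c hf hi
    by_cases hguard : i * i ≤ n
    · have hin : i ≤ n := pv_sq_le_imp_le i n hguard
      have hir : i ≤ (Nat.sqrt n.toNat : Int) := by
        have e1 : ((i.toNat : Nat) : Int) = i := Int.toNat_of_nonneg (by omega)
        have e2 : ((n.toNat : Nat) : Int) = n := Int.toNat_of_nonneg (by omega)
        have h1 : i.toNat * i.toNat ≤ n.toNat := by zify; rw [e1, e2]; exact hguard
        have h2 : i.toNat ≤ Nat.sqrt n.toNat := Nat.le_sqrt.mpr h1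
        omega
      rw [nf_loopB]
      simp only [hguard, dite_true]
      rw [PySem.List.pyRange_one_cons (by omega), List.map_cons, List.sum_cons,
          ih (i + 1) _ (by omega) (by omega)]
      unfold gB
      split_ifs <;> ring
    · have hir : ((Nat.sqrt n.toNat : Int) + 1) ≤ i := by
        have e1 : ((i.toNat : Nat) : Int) = i := Int.toNat_of_nonneg (by omega)
        have e2 : ((n.toNat : Nat) : Int) = n := Int.toNat_of_nonneg (by omega)
        have h1 : n.toNat < i.toNat * i.toNat := by zify; rw [e1, e2]; omega
        have h2 : Nat.sqrt n.toNat < i.toNat := Nat.sqrt_lt'.mpr (by rw [pow_two]; exact h1)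
        omega
      rw [nf_loopB]
      simp only [hguard, dite_false]
      rw [PySem.List.pyRange_one_eq_nil hir]
      simp

-- num_factors agree for n ≤ 0 (empty scan on both sides)
theorem num_eq_nonpos (n : Int) (hn : n ≤ 0) : num_factorsA n = num_factorsB n := by
  unfold num_factorsA num_factorsB
  rw [PySem.List.pyRange_one_eq_nil (by omega)]
  simp [hn]

-- num_factors agree for n ≥ 1: the divisor-pairing identity, cast through the loop bridges
theorem num_eq_pos (n : Int) (hn : 1 ≤ n) : num_factorsA n = num_factorsB n := by
  have hm : n = ((n.toNat : Nat) : Int) := by omega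
  set m : Nat := n.toNat with hmdef
  have hm1 : 1 ≤ m := by omega
  unfold num_factorsA num_factorsB
  rw [PySem.List.foldl_ite_add_one, if_neg (by omega),
      nf_loopB_spec n hn ((n + 1 - 1).toNat) 1 0 le_rfl le_rfl, zero_add, zero_add]
  rw [PySem.List.pyRange_one (a := 1) (b := n + 1), PySem.List.pyRange_one (a := 1) (b := (Nat.sqrt m : Int) + 1)]
  rw [List.countP_map, List.map_map]
  have hL : ((List.range ((n + 1 - 1).toNat)).countP ((fun x => decide (PySem.Int.mod n x = 0)) ∘ (fun k : Nat => (1 : Int) + k)) : Int)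
      = ∑ k ∈ Finset.range m, FA m (1 + k) := by
    have h1 : (n + 1 - 1).toNat = m := by omega
    rw [h1, pv_list_range_countP]
    apply Finset.sum_congr rfl
    intro k _
    have hc : ((1 + k : Nat) : Int) = 1 + (k : Int) := by push_cast; ring
    have hdvd : PySem.Int.mod n (1 + (k : Int)) = 0 ↔ ((1 + k : Nat)) ∣ m := by
      rw [PySem.Int.mod_eq_zero_iff_dvd, hm, ← hc]
      exact Int.natCast_dvd_natCast
    by_cases h : (1 + k) ∣ m
    · simp [Function.comp, FA, hdvd, h]
    · simp [Function.comp, FA, hdvd, h]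
  have hR : (((List.range (((Nat.sqrt m : Int) + 1 - 1).toNat)).map ((gB n) ∘ (fun k : Nat => (1 : Int) + k))).sum)
      = ∑ k ∈ Finset.range (Nat.sqrt m), FB m (1 + k) := by
    have h1 : ((Nat.sqrt m : Int) + 1 - 1).toNat = Nat.sqrt m := by omega
    rw [h1, pv_list_range_sum ((gB n) ∘ (fun k : Nat => (1 : Int) + k))]
    apply Finset.sum_congr rfl
    intro k _
    simp only [Function.comp_apply]
    unfold gB FB
    have hc : ((1 + k : Nat) : Int) = 1 + (k : Int) := by push_cast; ring
    have hdvd : PySem.Int.mod n (1 + (k : Int)) = 0 ↔ ((1 + k : Nat)) ∣ m := by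
      rw [PySem.Int.mod_eq_zero_iff_dvd, hm, ← hc]
      exact Int.natCast_dvd_natCast
    have hdiv : PySem.Int.floordiv n (1 + (k : Int)) = ((m / (1 + k) : Nat) : Int) := by
      rw [hm, ← hc]
      exact PySem.Int.floordiv_natCast m (1 + k)
    have heq : ((1 : Int) + k = ((m / (1 + k) : Nat) : Int)) ↔ (1 + k = m / (1 + k)) := by
      rw [← hc]; exact Nat.cast_inj
    by_cases h : (1 + k) ∣ m
    · rw [if_pos (hdvd.mpr h), if_pos h, hdiv]
      by_cases h2 : (1 + k) = m / (1 + k)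
      · rw [if_pos (heq.mpr h2), if_pos h2]
      · rw [if_neg (fun hc' => h2 (heq.mp hc')), if_neg h2]
    · rw [if_neg (fun hc' => h (hdvd.mp hc')), if_neg h]
  rw [hL, hR]
  have hcastA : ∑ k ∈ Finset.range m, FA m (1 + k) = ((∑ k ∈ Finset.range m, NA m (1 + k) : Nat) : Int) := by
    rw [Nat.cast_sum]
    exact Finset.sum_congr rfl (fun k _ => by unfold FA NA; split <;> simp)
  have hcastB : ∑ k ∈ Finset.range (Nat.sqrt m), FB m (1 + k)
      = ((∑ k ∈ Finset.range (Nat.sqrt m), NB m (1 + k) : Nat) : Int) := by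
    rw [Nat.cast_sum]
    exact Finset.sum_congr rfl (fun k _ => by unfold FB NB; split_ifs <;> simp)
  rw [hcastA, hcastB]
  have core : ∑ k ∈ Finset.range m, NA m (1 + k) = ∑ k ∈ Finset.range (Nat.sqrt m), NB m (1 + k) := by
    rw [pv_shift (NA m) m, pv_shift (NB m) (Nat.sqrt m)]
    have hcard : ∑ i ∈ Finset.Icc 1 m, NA m i = ((Finset.Icc 1 m).filter (· ∣ m)).card := by
      rw [Finset.card_filter]
      exact Finset.sum_congr rfl (fun i _ => rfl)
    rw [hcard]
    exact pv_pairing m hm1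
  exact congrArg _ core

theorem num_eq (n : Int) : num_factorsA n = num_factorsB n := by
  rcases le_or_gt n 0 with h | h
  · exact num_eq_nonpos n h
  · exact num_eq_pos n (by omega)

-- the Sus-Fuss branch is only taken for score ≥ 2
theorem branch_ge (n : Int) (h : num_factorsA n = 3 ∨ num_factorsA n = 4) : 2 ≤ n := by
  by_contra hlt
  push_neg at hlt
  rcases le_or_gt n 0 with h0 | h0
  · have : num_factorsA n = 0 := by
      unfold num_factorsA
      rw [PySem.List.pyRange_one_eq_nil (by omega)]
      rfl
    omega
  · have h1 : n = 1 := by omega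
    subst h1
    have : num_factorsA 1 = 1 := by decide
    omega

-- the two primality tests agree for n ≥ 2
theorem prime_eq (n : Int) (hn : 2 ≤ n) : is_primeA n = is_primeB n := by
  have hm : n = ((n.toNat : Nat) : Int) := by omega
  set m : Nat := n.toNat with hmdef
  have hm2 : 2 ≤ m := by omega
  rw [Bool.eq_iff_iff]
  have hA : is_primeA n = true ↔ Nat.Prime m := by
    unfold is_primeA
    rw [if_neg (by omega), List.all_eq_true]
    constructor
    · intro h
      rw [Nat.prime_def_lt']
      refine ⟨hm2, fun j hj2 hjm hdvd => ?_⟩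
      have hmem : (j : Int) ∈ PySem.List.pyRange 2 n 1 := by
        rw [PySem.List.mem_pyRange_one]
        omega
      have := h _ hmem
      simp only [Bool.not_eq_true', decide_eq_false_iff_not] at this
      apply this
      rw [PySem.Int.mod_eq_zero_iff_dvd, hm]
      exact_mod_cast hdvd
    · intro hp k hk
      rw [PySem.List.mem_pyRange_one] at hk
      simp only [Bool.not_eq_true', decide_eq_false_iff_not]
      intro hmod
      rw [PySem.Int.mod_eq_zero_iff_dvd] at hmod
      have hk0 : k = ((k.toNat : Nat) : Int) := by omega
      have hdvd : k.toNat ∣ m := by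
        rw [hm] at hmod; rw [hk0] at hmod
        exact_mod_cast hmod
      exact (Nat.prime_def_lt'.mp hp).2 k.toNat (by omega) (by omega) hdvd
  have hB : is_primeB n = true ↔ Nat.Prime m := by
    unfold is_primeB
    rw [if_neg (by omega), ip_loopB_iff n ((n + 1 - 2).toNat) 2 le_rfl (by omega)]
    constructor
    · intro h
      rw [Nat.prime_def_le_sqrt]
      refine ⟨hm2, fun j hj2 hjs hdvd => ?_⟩
      apply h j (by omega)
      · have : j * j ≤ m := Nat.le_sqrt.mp hjs
        have hjm : (j : Int) * (j : Int) ≤ (m : Int) := by exact_mod_cast this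
        omega
      · rw [PySem.Int.mod_eq_zero_iff_dvd, hm]
        exact_mod_cast hdvd
    · intro hp j hj2 hjj hmod
      rw [PySem.Int.mod_eq_zero_iff_dvd] at hmod
      have hj0 : j = ((j.toNat : Nat) : Int) := by omega
      have hdvd : j.toNat ∣ m := by
        rw [hm] at hmod; rw [hj0] at hmod
        exact_mod_cast hmod
      have hjs : j.toNat ≤ Nat.sqrt m := by
        apply Nat.le_sqrt.mpr
        have e1 : ((j.toNat : Nat) : Int) = j := Int.toNat_of_nonneg (by omega)
        zify
        rw [e1, ← hm]
        exact hjj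
      exact (Nat.prime_def_le_sqrt.mp hp).2 j.toNat (by omega) hjs hdvd
  rw [hA, hB]

-- the two next-prime loops agree from any start s ≥ 2
theorem sp_eq : ∀ (fuel : Nat) (s : Int), 2 ≤ s → sp_loopA fuel s = sp_loopB fuel s := by
  intro fuel
  induction fuel with
  | zero => intro s _; rfl
  | succ fuel ih =>
    intro s hs
    unfold sp_loopA sp_loopB
    rw [prime_eq s hs]
    split
    · rfl
    · exact ih (s + 1) (by omega)

-- ===== VERDICT (by name: the statement is the Claim_ definition above) =====
theorem sus_points_spec : Claim_equal_sus_points := by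
  intro score _
  unfold Spec_sus_points sus_points sus_points_alt
  simp only [← num_eq]
  by_cases h : num_factorsA score = 3 ∨ num_factorsA score = 4
  · rw [if_pos h, if_pos h]
    exact sp_eq _ _ (branch_ge score h)
  · rw [if_neg h, if_neg h]
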